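-- pv_equiv track=rewrite | github.com/Prashantpandey2398/Implementation-of-Advanced-Algorithms-Using-Python | Graph_Coloring.py | check
-- ===== SOURCE A (Python) =====
-- def check(a,i,n,count,sol,j):
--     check_sol=a[count]
--     check_sol1=[]
--     for k in range(0,count+1):
--         if check_sol[k]==1:
--             check_sol1.append(sol[k])
--     if j not in check_sol1:
--         return 1
-- ===== SOURCE B (Python) =====
-- def check(a, i, n, count, sol, j):
--     # Index-set formulation: the set of adjacent vertex indices and the set of
--     # vertex indices already coloured j; the colour j is usable iff they are disjoint.
--     row = a[count]
--     neighbours = {k for k in range(count + 1) if row[k] == 1}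
--     same_coloured = {k for k, c in enumerate(sol) if c == j and k <= count}
--     if neighbours.isdisjoint(same_coloured):
--         return 1
-- ===== Notes on version B (the rewrite author's own statement) =====
-- stated objective: alternative
-- what changed: B recasts the test as disjointness of two index sets -- the set of adjacent vertices among 0..count and the set of vertices already coloured j, built by an independent scan of sol -- instead of A's pass that collects the colours of adjacent vertices and then tests j's membership in that list.
import Mathlib
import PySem

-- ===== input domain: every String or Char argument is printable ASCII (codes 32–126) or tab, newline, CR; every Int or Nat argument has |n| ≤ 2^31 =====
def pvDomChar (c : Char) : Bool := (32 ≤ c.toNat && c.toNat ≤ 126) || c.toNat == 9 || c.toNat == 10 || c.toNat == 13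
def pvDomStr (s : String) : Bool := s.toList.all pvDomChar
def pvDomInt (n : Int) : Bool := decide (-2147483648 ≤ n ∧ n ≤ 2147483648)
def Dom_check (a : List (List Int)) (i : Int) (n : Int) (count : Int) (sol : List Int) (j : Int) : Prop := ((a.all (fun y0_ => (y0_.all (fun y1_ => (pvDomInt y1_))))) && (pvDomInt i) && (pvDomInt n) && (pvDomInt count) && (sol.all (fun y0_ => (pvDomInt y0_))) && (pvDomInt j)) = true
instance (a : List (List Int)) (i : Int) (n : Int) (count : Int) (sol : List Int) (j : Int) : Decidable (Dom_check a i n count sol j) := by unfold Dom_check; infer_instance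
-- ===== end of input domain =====

-- B recasts A's "collect adjacent colours, then membership test" as disjointness of two index
-- sets (adjacent vertices vs vertices already coloured j); return-value equivalence proved on Pre_.

-- ===== PORT A =====
def check (a : List (List Int)) (i : Int) (n : Int) (count : Int) (sol : List Int) (j : Int) : Option Int :=
  let check_sol := PySem.List.pyGetD a count []
  let check_sol1 := (PySem.List.pyRange 0 (count + 1) 1).foldl
    (fun acc k =>
      if PySem.List.pyGetD check_sol k 0 = 1 then acc ++ [PySem.List.pyGetD sol k 0] else acc) []
  if j ∉ check_sol1 then some 1 else none

-- ===== PORT B =====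
def check_alt (a : List (List Int)) (i : Int) (n : Int) (count : Int) (sol : List Int) (j : Int) : Option Int :=
  let row := PySem.List.pyGetD a count []
  let neighbours : PySem.Set Int :=
    PySem.Set.ofList ((PySem.List.pyRange 0 (count + 1) 1).filter
      (fun k => PySem.List.pyGetD row k 0 == 1))
  let same_coloured : PySem.Set Int :=
    PySem.Set.ofList (((PySem.List.enumerate sol 0).filter
      (fun p => p.2 == j && decide (p.1 ≤ count))).map (·.1))
  if PySem.Set.isdisjoint neighbours same_coloured then some 1 else none

-- ===== PRECONDITION & SPEC =====
-- Pre_ excludes exactly the inputs where Python A raises an IndexError: a[count] out of range,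
-- or the loop reading check_sol[k] (or sol[k] when check_sol[k]==1) past the end.
def Pre_check (a : List (List Int)) (i : Int) (n : Int) (count : Int) (sol : List Int) (j : Int) : Prop :=
  PySem.Raise.InRange a.length count ∧
  ∀ k ∈ List.range (count + 1).toNat,
    k < (PySem.List.pyGetD a count []).length ∧
    ((PySem.List.pyGetD a count []).getD k 0 = 1 → k < sol.length)
instance (a : List (List Int)) (i : Int) (n : Int) (count : Int) (sol : List Int) (j : Int) : Decidable (Pre_check a i n count sol j) := by unfold Pre_check; infer_instance

def pvWitness_check : List (List Int) × Int × Int × Int × List Int × Int :=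
  ([[1, 0], [1, 1]], 0, 2, 1, [0, 1], 2)

def Spec_check (a : List (List Int)) (i : Int) (n : Int) (count : Int) (sol : List Int) (j : Int) (out : Option Int) : Prop := out = check_alt a i n count sol j
instance (a : List (List Int)) (i : Int) (n : Int) (count : Int) (sol : List Int) (j : Int) (out : Option Int) : Decidable (Spec_check a i n count sol j out) := by unfold Spec_check; infer_instance

-- ===== CLAIM (what is proved, stated in full; the proofs are below) =====
def Claim_equal_check : Prop := ∀ (a : List (List Int)) (i : Int) (n : Int) (count : Int) (sol : List Int) (j : Int), Dom_check a i n count sol j → Pre_check a i n count sol j → Spec_check a i n count sol j (check a i n count sol j)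

-- ===== LEMMAS AND PROOFS =====

-- A's foldl builds the list of sol[k] over the conflict-flagged k; membership in it is exactly "some k conflicts"
theorem mem_foldl_iff (row sol : List Int) (j : Int) (L : List Int) (acc : List Int) :
    (j ∈ L.foldl (fun acc k =>
        if PySem.List.pyGetD row k 0 = 1 then acc ++ [PySem.List.pyGetD sol k 0] else acc) acc) ↔
      j ∈ acc ∨ ∃ k ∈ L, PySem.List.pyGetD row k 0 = 1 ∧ PySem.List.pyGetD sol k 0 = j := by
  induction L generalizing acc with
  | nil => simp
  | cons x xs ih =>
      simp only [List.foldl_cons]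
      by_cases hx : PySem.List.pyGetD row x 0 = 1
      · rw [if_pos hx, ih]
        constructor
        · rintro (h | ⟨k, hk, h1, h2⟩)
          · rcases List.mem_append.1 h with h | h
            · exact Or.inl h
            · exact Or.inr ⟨x, List.mem_cons_self, hx, (List.mem_singleton.1 h).symm⟩
          · exact Or.inr ⟨k, List.mem_cons_of_mem _ hk, h1, h2⟩
        · rintro (h | ⟨k, hk, h1, h2⟩)
          · exact Or.inl (List.mem_append.2 (Or.inl h))
          · rcases List.mem_cons.1 hk with rfl | hk
            · exact Or.inl (List.mem_append.2 (Or.inr (List.mem_singleton.2 h2.symm)))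
            · exact Or.inr ⟨k, hk, h1, h2⟩
      · rw [if_neg hx, ih]
        constructor
        · rintro (h | ⟨k, hk, h1, h2⟩)
          · exact Or.inl h
          · exact Or.inr ⟨k, List.mem_cons_of_mem _ hk, h1, h2⟩
        · rintro (h | ⟨k, hk, h1, h2⟩)
          · exact Or.inl h
          · rcases List.mem_cons.1 hk with rfl | hk
            · exact absurd h1 hx
            · exact Or.inr ⟨k, hk, h1, h2⟩

-- B's two index sets intersect exactly when some k in the range conflicts (under Pre_'s bounds)
theorem not_disjoint_iff (row sol : List Int) (count j : Int)
    (hpre : ∀ k ∈ List.range (count + 1).toNat,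
      (row.getD k 0 = 1 → k < sol.length)) :
    (¬ PySem.Set.isdisjoint
        (PySem.Set.ofList ((PySem.List.pyRange 0 (count + 1) 1).filter
          (fun k => PySem.List.pyGetD row k 0 == 1)))
        (PySem.Set.ofList (((PySem.List.enumerate sol 0).filter
          (fun p => p.2 == j && decide (p.1 ≤ count))).map (·.1))) = true) ↔
      ∃ k ∈ PySem.List.pyRange 0 (count + 1) 1,
        PySem.List.pyGetD row k 0 = 1 ∧ PySem.List.pyGetD sol k 0 = j := by
  constructor
  · intro h
    have h' : ¬ ∀ x ∈ (PySem.Set.ofList ((PySem.List.pyRange 0 (count + 1) 1).filter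
        (fun k => PySem.List.pyGetD row k 0 == 1))),
        x ∉ (PySem.Set.ofList (((PySem.List.enumerate sol 0).filter
          (fun p => p.2 == j && decide (p.1 ≤ count))).map (·.1))) :=
      fun hall => h ((PySem.Set.isdisjoint_iff _ _).2 hall)
    push_neg at h'
    obtain ⟨x, hxs, hxt⟩ := h'
    rw [PySem.Set.mem_ofList, List.mem_filter] at hxs
    rw [PySem.Set.mem_ofList, List.mem_map] at hxt
    obtain ⟨p, hp, hpx⟩ := hxt
    rw [List.mem_filter] at hp
    obtain ⟨hpe, hpc⟩ := hp
    rw [PySem.List.mem_enumerate_iff] at hpe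
    obtain ⟨m, hm, rfl⟩ := hpe
    simp only [Bool.and_eq_true, beq_iff_eq, decide_eq_true_eq] at hpc hxs
    refine ⟨x, hxs.1, hxs.2, ?_⟩
    have hx0 : x = (m : Int) := by simpa using hpx.symm
    rw [hx0, PySem.List.pyGetD_natCast, List.getD_eq_getElem sol 0 hm]
    simpa using hpc.1
  · rintro ⟨k, hk, h1, h2⟩
    intro hd
    have hk' := (PySem.List.mem_pyRange_one).1 hk
    obtain ⟨m, rfl⟩ : ∃ m : Nat, k = (m : Int) := ⟨k.toNat, by omega⟩
    rw [PySem.List.pyGetD_natCast] at h1 h2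
    have hklen : m < sol.length :=
      hpre m (by rw [List.mem_range]; omega) h1
    have hsj : sol[m] = j := by rw [← List.getD_eq_getElem sol 0 hklen]; exact h2
    have hmem_s : ((m : Int)) ∈ (PySem.Set.ofList ((PySem.List.pyRange 0 (count + 1) 1).filter
        (fun k => PySem.List.pyGetD row k 0 == 1))) := by
      rw [PySem.Set.mem_ofList, List.mem_filter]
      exact ⟨hk, by simpa using h1⟩
    have hmem_t : ((m : Int)) ∈ (PySem.Set.ofList (((PySem.List.enumerate sol 0).filter
        (fun p => p.2 == j && decide (p.1 ≤ count))).map (·.1))) := by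
      rw [PySem.Set.mem_ofList, List.mem_map]
      refine ⟨((m : Int), sol[m]), ?_, by simp⟩
      rw [List.mem_filter]
      constructor
      · rw [PySem.List.mem_enumerate_iff]
        exact ⟨m, hklen, by simp⟩
      · simp only [Bool.and_eq_true, beq_iff_eq, decide_eq_true_eq]
        exact ⟨hsj, by omega⟩
    exact (PySem.Set.isdisjoint_iff _ _).1 hd _ hmem_s hmem_t

-- ===== VERDICT (by name: the statement is the Claim_ definition above) =====
theorem check_spec : Claim_equal_check := by
  intro a i n count sol j _ hpre
  unfold Spec_check check check_alt
  simp only []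
  have hiff := not_disjoint_iff (PySem.List.pyGetD a count []) sol count j
    (fun k hk => (hpre.2 k hk).2)
  by_cases h : ∃ k ∈ PySem.List.pyRange 0 (count + 1) 1,
      PySem.List.pyGetD (PySem.List.pyGetD a count []) k 0 = 1 ∧ PySem.List.pyGetD sol k 0 = j
  · rw [if_neg (hiff.2 h), if_neg]
    intro hnot
    exact hnot ((mem_foldl_iff _ _ _ _ []).2 (Or.inr h))
  · rw [if_pos (by_contra fun hnd => h (hiff.1 hnd)), if_pos]
    intro hmem
    rcases (mem_foldl_iff _ _ _ _ []).1 hmem with h0 | hc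
    · exact absurd h0 (List.not_mem_nil)
    · exact h hc
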